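-- pv_equiv track=rewrite | github.com/MikesHorcrux/ABAProviderIntelligenceEngine | pipeline/stages/export.py | _role_bucket
-- ===== SOURCE A (Python) =====
-- def _role_bucket(title: str) -> str:
--     lowered = str(title or "").lower()
--     if any(token in lowered for token in ("owner", "founder", "ceo", "president", "principal", "co-founder")):
--         return "owner"
--     if any(
--         token in lowered
--         for token in ("operations", "general manager", "store manager", "gm", "operator", "regional manager", "district manager")
--     ):
--         return "operations"
--     if any(token in lowered for token in ("compliance", "regulatory", "metrc", "audit")):
--         return "compliance"
--     if any(token in lowered for token in ("buyer", "purchasing", "inventory", "merch", "category")):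
--         return "buyer"
--     if any(token in lowered for token in ("finance", "controller", "accounting", "cfo", "bookkeeper")):
--         return "finance"
--     if any(token in lowered for token in ("marketing", "brand", "community", "growth", "social")):
--         return "marketing"
--     if any(token in lowered for token in ("budtender", "store lead", "floor lead", "front desk", "reception", "assistant manager")):
--         return "store"
--     return "other"
-- ===== SOURCE B (Python) =====
-- # B classifies by priority MINIMIZATION over a flat alphabetical token index:
-- # every token carries the rank of its bucket; one pass keeps the smallest rank
-- # of any token found, and the bucket name is looked up from that rank at the end.
-- # Correct because A's if-chain returns the bucket with the smallest rank among
-- # matching buckets; the minimum is order-independent, so alphabetical traversal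
-- # gives the same answer.
--
-- _BUCKET_NAMES = ["owner", "operations", "compliance", "buyer", "finance", "marketing", "store"]
--
-- _TOKEN_RANK = [
--     ("accounting", 4), ("assistant manager", 6), ("audit", 2), ("bookkeeper", 4),
--     ("brand", 5), ("budtender", 6), ("buyer", 3), ("category", 3), ("ceo", 0),
--     ("cfo", 4), ("co-founder", 0), ("community", 5), ("compliance", 2),
--     ("controller", 4), ("district manager", 1), ("finance", 4), ("floor lead", 6),
--     ("founder", 0), ("front desk", 6), ("general manager", 1), ("gm", 1),
--     ("growth", 5), ("inventory", 3), ("marketing", 5), ("merch", 3), ("metrc", 2),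
--     ("operations", 1), ("operator", 1), ("owner", 0), ("president", 0),
--     ("principal", 0), ("purchasing", 3), ("reception", 6), ("regional manager", 1),
--     ("regulatory", 2), ("social", 5), ("store lead", 6), ("store manager", 1),
-- ]
--
--
-- def _role_bucket(title: str) -> str:
--     lowered = str(title or "").lower()
--     best = len(_BUCKET_NAMES)
--     for token, rank in _TOKEN_RANK:
--         if rank < best and token in lowered:
--             best = rank
--     return _BUCKET_NAMES[best] if best < len(_BUCKET_NAMES) else "other"
-- ===== Notes on version B (the rewrite author's own statement) =====
-- stated objective: alternative
-- what changed: Replaced the seven-branch first-match if-chain with a rank-minimization pass: each token carries its bucket's rank in one flat alphabetically ordered token index, a single fold keeps the minimum rank of any token occurring in the lowered title, and the bucket name is looked up from that rank (equivalent because the if-chain returns the minimum-rank matching bucket and min is traversal-order independent).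
import Mathlib
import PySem

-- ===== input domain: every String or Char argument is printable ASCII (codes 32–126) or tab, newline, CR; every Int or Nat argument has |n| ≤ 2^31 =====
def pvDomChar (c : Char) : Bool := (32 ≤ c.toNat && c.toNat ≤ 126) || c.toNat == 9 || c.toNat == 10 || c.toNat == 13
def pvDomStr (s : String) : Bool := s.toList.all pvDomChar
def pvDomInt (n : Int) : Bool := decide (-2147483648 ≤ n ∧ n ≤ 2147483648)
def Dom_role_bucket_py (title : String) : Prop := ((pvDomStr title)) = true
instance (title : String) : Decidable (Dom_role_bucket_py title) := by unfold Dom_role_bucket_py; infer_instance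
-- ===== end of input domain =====

-- B replaces A's flat seven-branch if-chain by a rank-minimization pass over a flat,
-- alphabetically ordered token→rank index (alternative decomposition, same cost).


-- ===== PORT A =====
-- 'any(token in lowered for token in toks)':
def anyTok (toks : List String) (lowered : String) : Bool :=
  toks.any (fun t => PySem.Str.isIn t lowered)

-- 'str(title or "")' is title itself ("" when title = ""), so lowered = title.lower().
def role_bucket_py (title : String) : String :=
  let lowered := PySem.Str.lower (if title = "" then "" else title)
  if anyTok ["owner", "founder", "ceo", "president", "principal", "co-founder"] lowered then "owner"
  else if anyTok ["operations", "general manager", "store manager", "gm", "operator", "regional manager", "district manager"] lowered then "operations"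
  else if anyTok ["compliance", "regulatory", "metrc", "audit"] lowered then "compliance"
  else if anyTok ["buyer", "purchasing", "inventory", "merch", "category"] lowered then "buyer"
  else if anyTok ["finance", "controller", "accounting", "cfo", "bookkeeper"] lowered then "finance"
  else if anyTok ["marketing", "brand", "community", "growth", "social"] lowered then "marketing"
  else if anyTok ["budtender", "store lead", "floor lead", "front desk", "reception", "assistant manager"] lowered then "store"
  else "other"

-- ===== PORT B =====
def bucketNames : List String :=
  ["owner", "operations", "compliance", "buyer", "finance", "marketing", "store"]

-- flat (token, bucket rank) pairs, in alphabetical token order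
def tokenRank : List (String × Nat) :=
  [("accounting", 4), ("assistant manager", 6), ("audit", 2), ("bookkeeper", 4),
   ("brand", 5), ("budtender", 6), ("buyer", 3), ("category", 3), ("ceo", 0),
   ("cfo", 4), ("co-founder", 0), ("community", 5), ("compliance", 2),
   ("controller", 4), ("district manager", 1), ("finance", 4), ("floor lead", 6),
   ("founder", 0), ("front desk", 6), ("general manager", 1), ("gm", 1),
   ("growth", 5), ("inventory", 3), ("marketing", 5), ("merch", 3), ("metrc", 2),
   ("operations", 1), ("operator", 1), ("owner", 0), ("president", 0),
   ("principal", 0), ("purchasing", 3), ("reception", 6), ("regional manager", 1),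
   ("regulatory", 2), ("social", 5), ("store lead", 6), ("store manager", 1)]

def role_bucket_py_alt (title : String) : String :=
  let lowered := PySem.Str.lower (if title = "" then "" else title)
  let best := tokenRank.foldl
    (fun best p => if p.2 < best && PySem.Str.isIn p.1 lowered then p.2 else best)
    bucketNames.length
  if best < bucketNames.length then bucketNames.getD best "other" else "other"

-- ===== PRECONDITION & SPEC =====
def Spec_role_bucket_py (title : String) (out : String) : Prop := out = role_bucket_py_alt title
instance (title : String) (out : String) : Decidable (Spec_role_bucket_py title out) := by unfold Spec_role_bucket_py; infer_instance

-- ===== CLAIM (what is proved, stated in full; the proofs are below) =====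
def Claim_equal_role_bucket_py : Prop := ∀ (title : String), Dom_role_bucket_py title → Spec_role_bucket_py title (role_bucket_py title)

-- ===== LEMMAS AND PROOFS =====

-- the fold step keeps the minimum rank among matched tokens
def gMin (m : String → Bool) (best : Nat) (p : String × Nat) : Nat :=
  if m p.1 then min best p.2 else best

theorem step_eq_gMin (m : String → Bool) :
    (fun (best : Nat) (p : String × Nat) => if p.2 < best && m p.1 then p.2 else best) = gMin m := by
  funext best p
  cases h : m p.1
  · simp [gMin, h]
  · simp only [gMin, h, Bool.and_true, decide_eq_true_eq, if_true]
    split <;> omega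

theorem gMin_rcomm (m : String → Bool) (b : Nat) (p q : String × Nat) :
    gMin m (gMin m b p) q = gMin m (gMin m b q) p := by
  cases hp : m p.1 <;> cases hq : m q.1 <;> simp [gMin, hp, hq]
  omega

-- a same-rank group folds to a single conditional min
theorem foldl_gMin_group (m : String → Bool) (toks : List String) (i : Nat) (b : Nat) :
    List.foldl (gMin m) b (toks.map (fun t => (t, i))) =
      if toks.any m then min b i else b := by
  induction toks generalizing b with
  | nil => simp
  | cons t rest ih =>
      simp only [List.map_cons, List.foldl_cons, List.any_cons, ih, gMin]
      by_cases h : m t = true <;> by_cases hr : rest.any m = true <;> simp [h, hr]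

-- tokenRank is a permutation of the same tokens grouped by bucket in priority order
theorem tokenRank_perm :
    tokenRank.Perm
      ((["owner", "founder", "ceo", "president", "principal", "co-founder"].map (fun t => (t, 0))) ++
       (["operations", "general manager", "store manager", "gm", "operator", "regional manager", "district manager"].map (fun t => (t, 1))) ++
       (["compliance", "regulatory", "metrc", "audit"].map (fun t => (t, 2))) ++
       (["buyer", "purchasing", "inventory", "merch", "category"].map (fun t => (t, 3))) ++
       (["finance", "controller", "accounting", "cfo", "bookkeeper"].map (fun t => (t, 4))) ++
       (["marketing", "brand", "community", "growth", "social"].map (fun t => (t, 5))) ++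
       (["budtender", "store lead", "floor lead", "front desk", "reception", "assistant manager"].map (fun t => (t, 6)))) := by
  decide

-- the two algorithms agree for ANY membership predicate m on tokens
set_option maxHeartbeats 1600000 in
theorem core (m : String → Bool) :
    (if ["owner", "founder", "ceo", "president", "principal", "co-founder"].any m then "owner"
     else if ["operations", "general manager", "store manager", "gm", "operator", "regional manager", "district manager"].any m then "operations"
     else if ["compliance", "regulatory", "metrc", "audit"].any m then "compliance"
     else if ["buyer", "purchasing", "inventory", "merch", "category"].any m then "buyer"
     else if ["finance", "controller", "accounting", "cfo", "bookkeeper"].any m then "finance"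
     else if ["marketing", "brand", "community", "growth", "social"].any m then "marketing"
     else if ["budtender", "store lead", "floor lead", "front desk", "reception", "assistant manager"].any m then "store"
     else "other")
    =
    (if (tokenRank.foldl (fun best p => if p.2 < best && m p.1 then p.2 else best) bucketNames.length) < bucketNames.length
     then bucketNames.getD (tokenRank.foldl (fun best p => if p.2 < best && m p.1 then p.2 else best) bucketNames.length) "other"
     else "other") := by
  rw [step_eq_gMin m,
    tokenRank_perm.foldl_eq' (fun x _ y _ z => gMin_rcomm m z x y) bucketNames.length]
  simp only [List.foldl_append, foldl_gMin_group]
  by_cases h0 : ["owner", "founder", "ceo", "president", "principal", "co-founder"].any m = true <;>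
  by_cases h1 : ["operations", "general manager", "store manager", "gm", "operator", "regional manager", "district manager"].any m = true <;>
  by_cases h2 : ["compliance", "regulatory", "metrc", "audit"].any m = true <;>
  by_cases h3 : ["buyer", "purchasing", "inventory", "merch", "category"].any m = true <;>
  by_cases h4 : ["finance", "controller", "accounting", "cfo", "bookkeeper"].any m = true <;>
  by_cases h5 : ["marketing", "brand", "community", "growth", "social"].any m = true <;>
  by_cases h6 : ["budtender", "store lead", "floor lead", "front desk", "reception", "assistant manager"].any m = true <;>
  simp [h0, h1, h2, h3, h4, h5, h6, bucketNames]

-- ===== VERDICT (by name: the statement is the Claim_ definition above) =====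
theorem role_bucket_py_spec : Claim_equal_role_bucket_py := by
  intro title _
  exact core (fun t => PySem.Str.isIn t (PySem.Str.lower (if title = "" then "" else title)))
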